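-- pv_equiv track=rewrite | github.com/vvhsSMG/haktiv8 | main.py | chunk_coords_for_gmaps
-- ===== SOURCE A (Python) =====
-- MAX_WAYPOINTS_PER_GMAPS_URL = 20
--
-- def chunk_coords_for_gmaps(coords, max_wp_between=MAX_WAYPOINTS_PER_GMAPS_URL):
--     if len(coords) <= max_wp_between + 2:
--         return [coords]
--     segs = []
--     i = 0
--     while i < len(coords) - 1:
--         j = min(i + max_wp_between + 1, len(coords) - 1)
--         segs.append(coords[i:j + 1])
--         i = j
--     return segs
-- ===== SOURCE B (Python) =====
-- MAX_WAYPOINTS_PER_GMAPS_URL = 20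
--
-- def chunk_coords_for_gmaps(coords, max_wp_between=MAX_WAYPOINTS_PER_GMAPS_URL):
--     if len(coords) <= max_wp_between + 2:
--         return [coords]
--     size = max_wp_between + 2  # points in a full chunk
--     segs = []
--     cur = []
--     for pt in coords:
--         cur.append(pt)
--         if len(cur) == size:
--             segs.append(cur)
--             cur = [pt]  # overlap: next chunk starts at this point
--     if len(cur) > 1:
--         segs.append(cur)
--     return segs
-- ===== Notes on version B (the rewrite author's own statement) =====
-- stated objective: alternative
-- what changed: Replaces A's index-arithmetic while-loop that slices coords[i:j+1] and jumps i=j by a single element-wise pass carrying the current chunk in an accumulator, closing it when it reaches max_wp_between+2 points and restarting at the overlap point.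
import Mathlib
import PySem

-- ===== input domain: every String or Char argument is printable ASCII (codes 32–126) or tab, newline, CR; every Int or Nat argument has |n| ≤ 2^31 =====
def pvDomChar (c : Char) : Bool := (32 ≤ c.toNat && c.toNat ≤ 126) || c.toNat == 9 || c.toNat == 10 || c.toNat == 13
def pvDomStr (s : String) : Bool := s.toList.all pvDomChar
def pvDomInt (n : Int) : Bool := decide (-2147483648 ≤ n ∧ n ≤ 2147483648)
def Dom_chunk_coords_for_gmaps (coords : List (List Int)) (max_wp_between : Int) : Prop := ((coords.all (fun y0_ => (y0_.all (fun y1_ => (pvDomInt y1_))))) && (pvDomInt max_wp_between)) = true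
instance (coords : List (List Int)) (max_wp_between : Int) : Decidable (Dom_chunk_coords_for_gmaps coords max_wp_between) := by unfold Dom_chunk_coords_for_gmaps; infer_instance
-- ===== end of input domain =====

-- B replaces A's index/slice while-loop by a single element-wise pass that grows the current
-- chunk and closes it (restarting at the overlap point) when full; same cost, alternative traversal.


-- ===== PORT A =====
-- while i < len(coords)-1: j = min(i+mw+1, len-1); segs.append(coords[i:j+1]); i = j
-- (fuel = coords.length suffices: under Pre_ the loop body advances i by at least 1 each pass)
def chunkLoopA (coords : List (List Int)) (mw : Int) : Nat → Int → List (List (List Int)) → List (List (List Int))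
  | 0, _, acc => acc
  | fuel + 1, i, acc =>
    if i < (coords.length : Int) - 1 then
      chunkLoopA coords mw fuel (min (i + mw + 1) ((coords.length : Int) - 1))
        (acc ++ [PySem.List.slice coords (some i) (some (min (i + mw + 1) ((coords.length : Int) - 1) + 1))])
    else acc

def chunk_coords_for_gmaps (coords : List (List Int)) (max_wp_between : Int) : List (List (List Int)) :=
  if (coords.length : Int) ≤ max_wp_between + 2 then [coords]
  else chunkLoopA coords max_wp_between coords.length 0 []

-- ===== PORT B =====
-- cur.append(pt); if len(cur) == size: segs.append(cur); cur = [pt]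
def chunkStepB (size : Int) (st : List (List (List Int)) × List (List Int)) (pt : List Int) :
    List (List (List Int)) × List (List Int) :=
  let cur := st.2 ++ [pt]
  if (cur.length : Int) = size then (st.1 ++ [cur], [pt]) else (st.1, cur)

-- if len(cur) > 1: segs.append(cur)
def chunkFinishB (st : List (List (List Int)) × List (List Int)) : List (List (List Int)) :=
  if 1 < (st.2.length : Int) then st.1 ++ [st.2] else st.1

def chunk_coords_for_gmaps_alt (coords : List (List Int)) (max_wp_between : Int) : List (List (List Int)) :=
  if (coords.length : Int) ≤ max_wp_between + 2 then [coords]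
  else chunkFinishB (coords.foldl (chunkStepB (max_wp_between + 2)) ([], []))

-- ===== PRECONDITION & SPEC =====
-- Pre_ excludes negative max_wp_between on lists long enough to enter A's loop: there A never
-- returns (i = j stands still or moves backwards, an infinite loop). On every input A actually
-- returns, Pre_ holds.
def Pre_chunk_coords_for_gmaps (coords : List (List Int)) (max_wp_between : Int) : Prop :=
  (coords.length : Int) ≤ max_wp_between + 2 ∨ 0 ≤ max_wp_between
instance (coords : List (List Int)) (max_wp_between : Int) : Decidable (Pre_chunk_coords_for_gmaps coords max_wp_between) := by unfold Pre_chunk_coords_for_gmaps; infer_instance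

def pvWitness_chunk_coords_for_gmaps : List (List Int) × Int := ([[0], [1], [2], [3], [4]], 1)

def Spec_chunk_coords_for_gmaps (coords : List (List Int)) (max_wp_between : Int) (out : List (List (List Int))) : Prop := out = chunk_coords_for_gmaps_alt coords max_wp_between
instance (coords : List (List Int)) (max_wp_between : Int) (out : List (List (List Int))) : Decidable (Spec_chunk_coords_for_gmaps coords max_wp_between out) := by unfold Spec_chunk_coords_for_gmaps; infer_instance

-- ===== CLAIM (what is proved, stated in full; the proofs are below) =====
def Claim_equal_chunk_coords_for_gmaps : Prop := ∀ (coords : List (List Int)) (max_wp_between : Int), Dom_chunk_coords_for_gmaps coords max_wp_between → Pre_chunk_coords_for_gmaps coords max_wp_between → Spec_chunk_coords_for_gmaps coords max_wp_between (chunk_coords_for_gmaps coords max_wp_between)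

-- ===== LEMMAS AND PROOFS =====

-- folding elements that never fill the current chunk just appends them
lemma foldl_no_emit (size : Int) : ∀ (l : List (List Int)) (s : List (List (List Int))) (c : List (List Int)),
    ((c.length + l.length : Nat) : Int) < size →
    List.foldl (chunkStepB size) (s, c) l = (s, c ++ l) := by
  intro l
  induction l with
  | nil => intro s c _; simp
  | cons a l ih =>
    intro s c h
    simp only [List.foldl_cons, chunkStepB]
    rw [if_neg (by simp only [List.length_append, List.length_cons, List.length_nil] at h ⊢; push_cast at h ⊢; omega)]
    rw [ih s (c ++ [a]) (by simp only [List.length_append, List.length_cons, List.length_nil] at h ⊢; push_cast at h ⊢; omega)]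
    simp

-- folding elements that fill the chunk exactly at the last element emits the full chunk
-- and restarts from that last element
lemma foldl_emit_last (size : Int) (l : List (List Int)) (a : List Int)
    (s : List (List (List Int))) (c : List (List Int))
    (h : ((c.length + l.length : Nat) : Int) + 1 = size) :
    List.foldl (chunkStepB size) (s, c) (l ++ [a]) = (s ++ [c ++ l ++ [a]], [a]) := by
  rw [List.foldl_append]
  rw [foldl_no_emit size l s c (by omega)]
  simp only [List.foldl_cons, List.foldl_nil, chunkStepB]
  rw [if_pos (by simp only [List.length_append, List.length_cons, List.length_nil] at h ⊢; push_cast at h ⊢; omega)]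

-- A's loop from index i equals B's fold continued from state (acc, [coords[i]])
lemma loopA_eq_foldB (coords : List (List Int)) (mw : Int) (hmw : 0 ≤ mw) :
    ∀ (fuel : Nat) (i : Nat) (acc : List (List (List Int))) (c : List Int) (rest : List (List Int)),
      coords.drop i = c :: rest → rest.length ≤ fuel →
      chunkLoopA coords mw fuel (i : Int) acc =
        chunkFinishB (List.foldl (chunkStepB (mw + 2)) (acc, [c]) rest) := by
  intro fuel
  induction fuel with
  | zero =>
    intro i acc c rest hdrop hfuel
    have hrest : rest = [] := by simpa using List.length_eq_zero_iff.mp (by omega)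
    subst hrest
    rw [chunkLoopA]
    simp [chunkFinishB]
  | succ fuel ih =>
    intro i acc c rest hdrop hfuel
    have hlen : coords.length = i + 1 + rest.length := by
      have := congrArg List.length hdrop
      simp [List.length_drop] at this
      omega
    rcases rest with _ | ⟨b, rest'⟩
    · -- i = n - 1 : loop guard false, fold is finished with a 1-element cur
      have hlen0 : coords.length = i + 1 := by simpa using hlen
      rw [chunkLoopA, if_neg (by omega)]
      simp [chunkFinishB]
    · -- i < n - 1 : one loop iteration = consuming k' + 1 elements of the fold
      have hL : (b :: rest').length = rest'.length + 1 := by simp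
      rw [hL] at hlen hfuel
      rw [chunkLoopA, if_pos (by omega)]
      -- k' + 1 = number of fold elements consumed this iteration
      obtain ⟨k', hk⟩ : ∃ k', min (mw.toNat + 1) (rest'.length + 1) = k' + 1 :=
        ⟨min (mw.toNat + 1) (rest'.length + 1) - 1, by omega⟩
      have hkr : k' ≤ rest'.length := by omega
      have hgetlt : k' < (b :: rest').length := by rw [hL]; omega
      have hj : min ((i : Int) + mw + 1) ((coords.length : Int) - 1) = ((i + (k' + 1) : Nat) : Int) := by
        push_cast
        omega
      rw [hj]
      -- the appended slice is c :: (b :: rest').take (k' + 1)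
      have hslice : PySem.List.slice coords (some (i : Int)) (some (((i + (k' + 1) : Nat) : Int) + 1)) =
          c :: (b :: rest').take (k' + 1) := by
        have h1 : ((i + (k' + 1) : Nat) : Int) + 1 = (i : Int) + ((k' + 2 : Nat) : Int) := by
          push_cast; ring
        rw [h1, PySem.List.slice_natCast_add coords i (k' + 2)]
        rw [hdrop]
        simp
      rw [hslice]
      -- split the fold at k' + 1
      have hsplit : List.foldl (chunkStepB (mw + 2)) (acc, [c]) (b :: rest') =
          List.foldl (chunkStepB (mw + 2))
            (List.foldl (chunkStepB (mw + 2)) (acc, [c]) ((b :: rest').take (k' + 1)))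
            ((b :: rest').drop (k' + 1)) := by
        rw [← List.foldl_append, List.take_append_drop]
      rw [hsplit]
      have hdropk : coords.drop (i + (k' + 1)) = (b :: rest').drop k' := by
        have h3 := congrArg (List.drop (k' + 1)) hdrop
        rw [List.drop_drop] at h3
        simp only [List.drop_succ_cons] at h3
        rw [← h3]
      have hgl : (b :: rest').drop k' =
          (b :: rest')[k']'hgetlt :: (b :: rest').drop (k' + 1) :=
        List.drop_eq_getElem_cons hgetlt
      have htk : (b :: rest').take (k' + 1) =
          (b :: rest').take k' ++ [(b :: rest')[k']'hgetlt] := by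
        rw [List.take_add_one, List.getElem?_eq_getElem hgetlt]
        simp
      have hlt : ((b :: rest').take k').length = k' := by
        rw [List.length_take, hL]; omega
      have hemit : List.foldl (chunkStepB (mw + 2)) (acc, [c]) ((b :: rest').take (k' + 1)) =
          if k' = mw.toNat then
            (acc ++ [c :: (b :: rest').take (k' + 1)], [(b :: rest')[k']'hgetlt])
          else (acc, c :: (b :: rest').take (k' + 1)) := by
        by_cases hfull : k' = mw.toNat
        · rw [if_pos hfull, htk,
            foldl_emit_last (mw + 2) ((b :: rest').take k') ((b :: rest')[k']'hgetlt) acc [c]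
              (by simp only [List.length_cons, List.length_nil, hlt]; push_cast; omega)]
          simp
        · rw [if_neg hfull,
            foldl_no_emit (mw + 2) ((b :: rest').take (k' + 1)) acc [c]
              (by simp only [List.length_cons, List.length_nil, List.length_take, hL]; push_cast; omega)]
          simp
      rw [hemit]
      by_cases hfull : k' = mw.toNat
      · -- full chunk was emitted; continue the fold from the overlap point via the IH
        rw [if_pos hfull]
        rw [ih (i + (k' + 1)) (acc ++ [c :: (b :: rest').take (k' + 1)]) ((b :: rest')[k']'hgetlt)
            ((b :: rest').drop (k' + 1)) (by rw [hdropk, hgl]) (by rw [List.length_drop, hL]; omega)]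
      · -- short final chunk: k' = rest'.length, the fold ends; chunkFinishB appends cur
        rw [if_neg hfull]
        have hkval : k' = rest'.length := by omega
        have hdropnil : (b :: rest').drop (k' + 1) = [] := by
          rw [List.drop_eq_nil_iff, hL]; omega
        have htfull : (b :: rest').take (k' + 1) = b :: rest' :=
          List.take_of_length_le (by rw [hL]; omega)
        rw [hdropnil, List.foldl_nil]
        rw [ih (i + (k' + 1)) (acc ++ [c :: (b :: rest').take (k' + 1)]) ((b :: rest')[k']'hgetlt)
            ((b :: rest').drop (k' + 1)) (by rw [hdropk, hgl]) (by rw [List.length_drop, hL]; omega)]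
        rw [hdropnil, List.foldl_nil, htfull]
        simp only [chunkFinishB]
        rw [if_neg (by simp), if_pos (by simp)]

-- ===== VERDICT (by name: the statement is the Claim_ definition above) =====
theorem chunk_coords_for_gmaps_spec : Claim_equal_chunk_coords_for_gmaps := by
  intro coords mw _hdom hpre
  unfold Spec_chunk_coords_for_gmaps chunk_coords_for_gmaps chunk_coords_for_gmaps_alt
  by_cases hg : (coords.length : Int) ≤ mw + 2
  · rw [if_pos hg, if_pos hg]
  · rw [if_neg hg, if_neg hg]
    have hmw : 0 ≤ mw := by
      rcases hpre with h | h
      · exact absurd h hg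
      · exact h
    rcases coords with _ | ⟨c0, rest⟩
    · simp at hg; omega
    · rw [show ((0:Int)) = ((0 : Nat) : Int) by simp]
      rw [loopA_eq_foldB (c0 :: rest) mw hmw (c0 :: rest).length 0 [] c0 rest rfl (by simp)]
      -- B's fold consumes the head first, reaching the same state (acc = [], cur = [c0])
      simp only [List.foldl_cons, chunkStepB]
      rw [if_neg (by simp only [List.length_append, List.length_cons, List.length_nil] at hg ⊢; push_cast at hg ⊢; omega)]
      simp
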